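-- pv_equiv track=rewrite | github.com/jbirby/POCSAG-Pager-Codec | scripts/pocsag_common.py | encode_alpha_message
-- ===== SOURCE A (Python) =====
-- def encode_alpha_message(text):
--     """
--     Encode alphanumeric message to 20-bit chunks.
--     Uses 7-bit ASCII, LSB first (bit 0 of character sent first).
--
--     Args:
--         text: ASCII text string
--
--     Returns:
--         List of 20-bit data values
--     """
--     # Convert text to 7-bit ASCII values (LSB first)
--     bits = []
--     for char in text:
--         ascii_val = ord(char) & 0x7F
--         for i in range(7):
--             bits.append((ascii_val >> i) & 1)
--
--     # Pack bits into 20-bit chunks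
--     chunks = []
--     for i in range(0, len(bits), 20):
--         chunk_bits = bits[i:i+20]
--         # Pad with zeros if needed
--         while len(chunk_bits) < 20:
--             chunk_bits.append(0)
--
--         # Pack MSB first (even though bits were LSB first)
--         value = 0
--         for bit in chunk_bits:
--             value = (value << 1) | bit
--         chunks.append(value & 0xFFFFF)
--
--     return chunks
-- ===== SOURCE B (Python) =====
-- def encode_alpha_message(text):
--     """
--     Encode alphanumeric message to 20-bit chunks.
--     Single streaming pass: fold each character's 7 bits (LSB first) into a
--     running accumulator, emitting a chunk whenever 20 bits are collected;
--     a final partial chunk is padded with trailing zeros by one shift.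
--     """
--     chunks = []
--     acc = 0
--     count = 0
--     for char in text:
--         ascii_val = ord(char) & 0x7F
--         for i in range(7):
--             acc = (acc << 1) | ((ascii_val >> i) & 1)
--             count += 1
--             if count == 20:
--                 chunks.append(acc & 0xFFFFF)
--                 acc = 0
--                 count = 0
--     if count:
--         chunks.append((acc << (20 - count)) & 0xFFFFF)
--     return chunks
-- ===== Notes on version B (the rewrite author's own statement) =====
-- stated objective: simpler
-- what changed: Replaced A's two-phase build-a-full-bit-list-then-slice/pad/pack approach with a single streaming pass that folds each character's 7 bits into a running accumulator, emitting a 20-bit chunk whenever the bit counter reaches 20 and padding the final partial chunk with one shift.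
import Mathlib
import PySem

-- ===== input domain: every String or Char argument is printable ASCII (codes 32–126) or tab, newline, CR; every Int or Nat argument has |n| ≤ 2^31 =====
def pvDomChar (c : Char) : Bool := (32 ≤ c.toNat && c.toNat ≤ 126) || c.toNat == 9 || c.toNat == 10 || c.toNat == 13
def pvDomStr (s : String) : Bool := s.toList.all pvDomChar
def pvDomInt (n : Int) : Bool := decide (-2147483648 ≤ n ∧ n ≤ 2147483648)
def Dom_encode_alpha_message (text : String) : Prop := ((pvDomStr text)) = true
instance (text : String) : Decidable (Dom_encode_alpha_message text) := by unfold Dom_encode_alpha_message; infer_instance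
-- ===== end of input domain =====

-- B replaces A's build-a-bit-list-then-slice-and-pack phases by one streaming pass with a
-- bit accumulator, emitting a chunk every 20 bits (objective: simpler one-pass decomposition).

-- ===== PORT A =====
def encode_alpha_message (text : String) : List Int :=
  -- bits = []; for char in text: for i in range(7): bits.append((ord(char) & 0x7F >> i) & 1)
  let bits : List Int :=
    text.toList.foldl (fun bits char =>
      let ascii_val : Int := PySem.Int.band (Int.ofNat char.toNat) 0x7F
      (List.range 7).foldl (fun bits i => bits ++ [PySem.Int.band (ascii_val >>> i) 1]) bits) []
  -- for i in range(0, len(bits), 20): slice, pad (while-loop = append zeros), pack MSB first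
  (PySem.List.pyRange 0 (bits.length : Int) 20).foldl (fun chunks i =>
    let chunk_bits := PySem.List.slice bits (some i) (some (i + 20))
    let chunk_bits := chunk_bits ++ List.replicate (20 - chunk_bits.length) (0 : Int)
    let value := chunk_bits.foldl (fun value bit => PySem.Int.bor (value <<< (1:Nat)) bit) 0
    chunks ++ [PySem.Int.band value 0xFFFFF]) []

-- ===== PORT B =====
def encode_alpha_message_alt (text : String) : List Int :=
  -- single pass: state (chunks, acc, count); emit a chunk whenever count hits 20
  let st :=
    text.toList.foldl (fun (st : List Int × Int × Int) char =>
      let ascii_val : Int := PySem.Int.band (Int.ofNat char.toNat) 0x7F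
      (List.range 7).foldl (fun (st : List Int × Int × Int) i =>
        let acc := PySem.Int.bor (st.2.1 <<< (1:Nat)) (PySem.Int.band (ascii_val >>> i) 1)
        let count := st.2.2 + 1
        if count = 20 then (st.1 ++ [PySem.Int.band acc 0xFFFFF], (0 : Int), (0 : Int))
        else (st.1, acc, count)) st)
      (([], 0, 0) : List Int × Int × Int)
  if st.2.2 ≠ 0 then st.1 ++ [PySem.Int.band (st.2.1 <<< (20 - st.2.2).toNat) 0xFFFFF]
  else st.1

-- ===== PRECONDITION & SPEC =====
def Spec_encode_alpha_message (text : String) (out : List Int) : Prop := out = encode_alpha_message_alt text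
instance (text : String) (out : List Int) : Decidable (Spec_encode_alpha_message text out) := by unfold Spec_encode_alpha_message; infer_instance

-- ===== CLAIM (what is proved, stated in full; the proofs are below) =====
def Claim_equal_encode_alpha_message : Prop := ∀ (text : String), Dom_encode_alpha_message text → Spec_encode_alpha_message text (encode_alpha_message text)

-- ===== LEMMAS AND PROOFS =====

lemma pvFlatMap_single {α β : Type} (g : α → β) (l : List α) :
    l.flatMap (fun x => [g x]) = l.map g := by
  induction l with
  | nil => rfl
  | cons a t ih => simp [List.flatMap_cons, ih]

lemma pvFlatMap_congr {α β : Type} {f g : α → List β} (l : List α)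
    (h : ∀ x, f x = g x) : l.flatMap f = l.flatMap g := by
  induction l with
  | nil => rfl
  | cons a t ih => simp [List.flatMap_cons, ih, h]

-- one bit of one character, and the whole LSB-first bit stream of the text
def pvBit (c : Char) (i : Nat) : Int :=
  PySem.Int.band (PySem.Int.band (Int.ofNat c.toNat) 0x7F >>> i) 1

def pvBits (text : String) : List Int :=
  text.toList.flatMap (fun c => (List.range 7).map (pvBit c))

-- MSB-first packing step shared by both ports
def pvShiftor (v b : Int) : Int := PySem.Int.bor (v <<< (1:Nat)) b

-- B's per-bit streaming step and finalizer
def pvStep (st : List Int × Int × Int) (b : Int) : List Int × Int × Int :=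
  if st.2.2 + 1 = 20 then (st.1 ++ [PySem.Int.band (pvShiftor st.2.1 b) 0xFFFFF], 0, 0)
  else (st.1, pvShiftor st.2.1 b, st.2.2 + 1)

def pvFin (st : List Int × Int × Int) : List Int :=
  if st.2.2 ≠ 0 then st.1 ++ [PySem.Int.band (st.2.1 <<< (20 - st.2.2).toNat) 0xFFFFF] else st.1

-- reference chunker: pack 20 bits at a time, pad the last chunk with zeros
def pvPack : List Int → List Int
  | bs =>
    if _h : bs = [] then [] else
      (PySem.Int.band
        ((bs.take 20 ++ List.replicate (20 - (bs.take 20).length) (0 : Int)).foldl pvShiftor 0)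
        0xFFFFF) :: pvPack (bs.drop 20)
termination_by bs => bs.length
decreasing_by
  have := List.length_pos_iff.mpr _h
  simp
  omega

lemma pvRange20_nil (a b : Int) (h : b ≤ a) : PySem.List.pyRange a b 20 = [] := by
  rw [PySem.List.pyRange_of_pos _ _ (by norm_num : (0:Int) < 20)]
  simp [show ¬ a < b by omega]

lemma pvRange20_cons (a b : Int) (h : a < b) :
    PySem.List.pyRange a b 20 = a :: PySem.List.pyRange (a + 20) b 20 := by
  rw [PySem.List.pyRange_of_pos _ _ (by norm_num : (0:Int) < 20),
      PySem.List.pyRange_of_pos _ _ (by norm_num : (0:Int) < 20)]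
  have h1 : ((b - a + 20 - 1) / 20).toNat
      = (if a + 20 < b then ((b - (a + 20) + 20 - 1) / 20).toNat else 0) + 1 := by
    split_ifs with h2 <;> omega
  rw [if_pos h, h1, List.range_succ_eq_map]
  simp only [List.map_cons, List.map_map]
  congr 1
  · ring
  · apply List.map_congr_left; intro k _; simp [Function.comp]; ring

lemma pvShiftor_replicate (k : Nat) (v : Int) :
    (List.replicate k (0 : Int)).foldl pvShiftor v = v <<< k := by
  induction k generalizing v with
  | zero => simp [Int.shiftLeft_eq]
  | succ n ih =>
      rw [List.replicate_succ, List.foldl_cons, ih]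
      have h1 : pvShiftor v 0 = v * 2 := by
        unfold pvShiftor
        rw [PySem.Int.bor_zero, Int.shiftLeft_eq]
        ring
      rw [h1]
      simp [Int.shiftLeft_eq, pow_succ]
      ring

lemma pvStep_foldl (t : List Int) : ∀ (cs : List Int) (acc c : Int), 0 ≤ c →
    c + (t.length : Int) ≤ 20 →
    t.foldl pvStep (cs, acc, c) =
      if c + (t.length : Int) = 20 ∧ t ≠ [] then
        (cs ++ [PySem.Int.band (t.foldl pvShiftor acc) 0xFFFFF], 0, 0)
      else (cs, t.foldl pvShiftor acc, c + (t.length : Int)) := by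
  induction t with
  | nil => intro cs acc c h0 hle; simp
  | cons b t ih =>
      intro cs acc c h0 hle
      rw [List.foldl_cons]
      by_cases hc : c + 1 = 20
      · have ht : t = [] := by
          have := hle
          simp at this
          exact List.eq_nil_of_length_eq_zero (by omega)
        subst ht
        simp [pvStep, hc]
      · have hstep : pvStep (cs, acc, c) b = (cs, pvShiftor acc b, c + 1) := by
          simp [pvStep, hc]
        rw [hstep, ih cs (pvShiftor acc b) (c + 1) (by omega) (by simp at hle ⊢; omega)]
        by_cases ht : t = []
        · subst ht; simp [hc]
        · have hlen : c + 1 + (t.length : Int) = c + ((b :: t).length : Int) := by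
            simp; ring
          have hcond : ((c + 1) + (t.length : Int) = 20 ∧ t ≠ []) ↔
              (c + ((b :: t).length : Int) = 20 ∧ (b :: t) ≠ []) := by
            simp [ht]; constructor <;> intro hh <;> omega
          split_ifs with hA hB hB
          · simp
          · exact absurd (hcond.mp hA) hB
          · exact absurd (hcond.mpr hB) hA
          · simp; omega

theorem pvStream (bs : List Int) (cs : List Int) :
    pvFin (bs.foldl pvStep (cs, 0, 0)) = cs ++ pvPack bs := by
  by_cases h0 : bs = []
  · subst h0
    rw [pvPack]
    simp [pvFin]
  · by_cases h20 : bs.length < 20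
    · rw [pvStep_foldl bs cs 0 0 le_rfl (by omega)]
      have hne : ¬ ((0:Int) + (bs.length : Int) = 20 ∧ bs ≠ []) := by
        intro hh; omega
      rw [if_neg hne]
      have hlen0 : (bs.length : Int) ≠ 0 := by
        have : bs.length ≠ 0 := fun hh => h0 (List.eq_nil_of_length_eq_zero hh)
        omega
      rw [pvPack]
      rw [dif_neg h0]
      have htake : bs.take 20 = bs := List.take_of_length_le (by omega)
      rw [htake, List.foldl_append, pvShiftor_replicate]
      simp only [pvFin]
      rw [if_pos (by simpa using hlen0)]
      simp [pvPack, List.drop_eq_nil_of_le (le_of_lt h20)]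
    · -- bs.length ≥ 20
      have hsplit : bs.foldl pvStep (cs, 0, 0)
          = (bs.drop 20).foldl pvStep ((bs.take 20).foldl pvStep (cs, 0, 0)) := by
        rw [← List.foldl_append, List.take_append_drop]
      rw [hsplit]
      have hlen : (bs.take 20).length = 20 := by simp; omega
      rw [pvStep_foldl (bs.take 20) cs 0 0 le_rfl (by rw [hlen]; norm_num)]
      rw [if_pos (by constructor; · rw [hlen]; norm_num
                     · intro hh; rw [hh] at hlen; simp at hlen)]
      rw [pvStream (bs.drop 20) _]
      conv_rhs => rw [pvPack]
      rw [dif_neg h0]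
      rw [show (20 - (bs.take 20).length) = 0 by rw [hlen]]
      simp [List.append_assoc]
termination_by bs.length
decreasing_by simp; omega

theorem pvLoopA (bs : List Int) (j : Nat) (cs : List Int) :
    (PySem.List.pyRange (j : Int) (bs.length : Int) 20).foldl (fun chunks i =>
      let chunk_bits := PySem.List.slice bs (some i) (some (i + 20))
      let chunk_bits := chunk_bits ++ List.replicate (20 - chunk_bits.length) (0 : Int)
      chunks ++ [PySem.Int.band (chunk_bits.foldl pvShiftor 0) 0xFFFFF]) cs
    = cs ++ pvPack (bs.drop j) := by
  by_cases h : j < bs.length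
  · rw [pvRange20_cons _ _ (by exact_mod_cast h), List.foldl_cons]
    have hslice : PySem.List.slice bs (some (j : Int)) (some ((j : Int) + 20))
        = (bs.drop j).take 20 := by
      have := PySem.List.slice_natCast_add bs j 20
      simpa using this
    simp only [hslice]
    have hcast : (j : Int) + 20 = ((j + 20 : Nat) : Int) := by push_cast; ring
    rw [hcast, pvLoopA bs (j + 20) _]
    rw [List.append_assoc]
    congr 1
    conv_rhs => rw [pvPack]
    have hne : bs.drop j ≠ [] := by
      intro hh
      have := List.length_drop (l := bs) (i := j)
      rw [hh] at this
      simp at this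
      omega
    rw [dif_neg hne]
    simp [List.drop_drop]
  · rw [pvRange20_nil _ _ (by exact_mod_cast Nat.le_of_not_lt h)]
    simp [List.drop_eq_nil_of_le (Nat.le_of_not_lt h), pvPack]

lemma pvFoldChars (l : List Char) (st : List Int × Int × Int) :
    l.foldl (fun st c => (List.range 7).foldl (fun st i => pvStep st (pvBit c i)) st) st
    = (l.flatMap (fun c => (List.range 7).map (pvBit c))).foldl pvStep st := by
  induction l generalizing st with
  | nil => rfl
  | cons c t ih =>
      rw [List.foldl_cons, ih, List.flatMap_cons, List.foldl_append, List.foldl_map]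

lemma pvBitsA_eq (text : String) :
    (text.toList.foldl (fun bits char =>
      (List.range 7).foldl (fun bits i =>
        bits ++ [PySem.Int.band (PySem.Int.band (Int.ofNat char.toNat) 0x7F >>> i) 1]) bits)
      ([] : List Int)) = pvBits text := by
  simp only [PySem.List.foldl_append_eq_flatMap]
  simp only [List.nil_append, pvBits]
  apply pvFlatMap_congr
  intro c
  rw [pvFlatMap_single]
  rfl

-- ===== VERDICT (by name: the statement is the Claim_ definition above) =====
theorem encode_alpha_message_spec : Claim_equal_encode_alpha_message := by
  intro text _
  show encode_alpha_message text = encode_alpha_message_alt text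
  have hA : encode_alpha_message text = pvPack (pvBits text) := by
    unfold encode_alpha_message
    simp only [show (fun (value bit : Int) => PySem.Int.bor (value <<< (1:Nat)) bit) = pvShiftor
      from rfl]
    rw [pvBitsA_eq]
    have := pvLoopA (pvBits text) 0 []
    simpa using this
  have hB : encode_alpha_message_alt text
      = pvFin ((pvBits text).foldl pvStep ([], 0, 0)) := by
    show pvFin (text.toList.foldl
        (fun st c => (List.range 7).foldl (fun st i => pvStep st (pvBit c i)) st)
        (([], 0, 0) : List Int × Int × Int))
      = pvFin ((pvBits text).foldl pvStep ([], 0, 0))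
    rw [pvFoldChars]
    rfl
  rw [hA, hB, pvStream]
  simp
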